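-- pv_equiv track=rewrite | github.com/chengyzhao/GAPartNet-Dataset | utils/urdf_utils.py | create_link_visual_collision_joint_indexs
-- ===== SOURCE A (Python) =====
-- def create_link_visual_collision_joint_indexs(urdf_lines):
--     link_prefix = '<link name="'
--     link_end = '</link>'
--     link_indexs = {}
--     for idx_l, line in enumerate(urdf_lines):
--         if link_prefix in line:
--             left_idx = line.find(link_prefix) + len(link_prefix)
--             right_idx = line.find('"', left_idx)
--             link_name = line[left_idx:right_idx]
--             start_idx = idx_l
--             end_idx = None
--             if '/' in line[right_idx:]:
--                 end_idx = start_idx + 1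
--             else:
--                 for idx_l2, line2 in enumerate(urdf_lines[start_idx + 1:]):
--                     if link_end in line2:
--                         end_idx = start_idx + 1 + idx_l2 + 1
--                         break
--             assert end_idx is not None
--             link_indexs[link_name] = (start_idx, end_idx)
--
--     visual_prefix = '<visual name="'
--     visual_end = '</visual>'
--     mesh_prefix = 'mesh filename="'
--     visual_indexs = {}
--     for idx_l, line in enumerate(urdf_lines):
--         if visual_prefix in line:
--             start_idx = idx_l
--             mesh_name = None
--             end_idx = None
--             for idx_l2, line2 in enumerate(urdf_lines[start_idx + 1:]):
--                 if mesh_prefix in line2: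
--                     left_idx = line2.find(mesh_prefix) + len(mesh_prefix)
--                     right_idx = line2.find('"', left_idx)
--                     assert mesh_name is None
--                     mesh_name = line2[left_idx:right_idx]
--                 if visual_end in line2:
--                     end_idx = start_idx + 1 + idx_l2 + 1
--                     break
--             assert end_idx is not None
--             visual_indexs[mesh_name] = (start_idx, end_idx)
--
--     collision_prefix = '<collision>'
--     collision_end = '</collision>'
--     mesh_prefix = 'mesh filename="'
--     collision_indexs = {}
--     for idx_l, line in enumerate(urdf_lines):
--         if collision_prefix in line:
--             start_idx = idx_l
--             mesh_name = None
--             end_idx = None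
--             for idx_l2, line2 in enumerate(urdf_lines[start_idx + 1:]):
--                 if mesh_prefix in line2:
--                     left_idx = line2.find(mesh_prefix) + len(mesh_prefix)
--                     right_idx = line2.find('"', left_idx)
--                     assert mesh_name is None
--                     mesh_name = line2[left_idx:right_idx]
--                 if collision_end in line2:
--                     end_idx = start_idx + 1 + idx_l2 + 1
--                     break
--             assert end_idx is not None
--             collision_indexs[mesh_name] = (start_idx, end_idx)
--
--     joint_prefix = '<joint name="'
--     joint_end = '</joint>'
--     joint_indexs = {}
--     for idx_l, line in enumerate(urdf_lines):
--         if joint_prefix in line: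
--             left_idx = line.find(joint_prefix) + len(joint_prefix)
--             right_idx = line.find('"', left_idx)
--             joint_name = line[left_idx:right_idx]
--             start_idx = idx_l
--             end_idx = None
--             if '/' in line[right_idx:]:
--                 end_idx = start_idx + 1
--             else:
--                 for idx_l2, line2 in enumerate(urdf_lines[start_idx + 1:]):
--                     if joint_end in line2:
--                         end_idx = start_idx + 1 + idx_l2 + 1
--                         break
--             assert end_idx is not None
--             joint_indexs[joint_name] = (start_idx, end_idx)
--
--     return link_indexs, visual_indexs, collision_indexs, joint_indexs
-- ===== SOURCE B (Python) =====
-- def create_link_visual_collision_joint_indexs(urdf_lines):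
--     n = len(urdf_lines)
--
--     def next_occ(marker):
--         # res[i] = smallest j >= i with marker in urdf_lines[j], else None; res[n] = None
--         res = [None] * (n + 1)
--         nxt = None
--         for i in range(n - 1, -1, -1):
--             if marker in urdf_lines[i]:
--                 nxt = i
--             res[i] = nxt
--         return res
--
--     next_link_end = next_occ('</link>')
--     next_visual_end = next_occ('</visual>')
--     next_coll_end = next_occ('</collision>')
--     next_joint_end = next_occ('</joint>')
--     next_mesh = next_occ('mesh filename="')
--
--     def extract(line, prefix):
--         left_idx = line.find(prefix) + len(prefix)
--         right_idx = line.find('"', left_idx)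
--         return line[left_idx:right_idx], right_idx
--
--     link_indexs, visual_indexs, collision_indexs, joint_indexs = {}, {}, {}, {}
--     for i, line in enumerate(urdf_lines):
--         if '<link name="' in line:
--             name, right_idx = extract(line, '<link name="')
--             if '/' in line[right_idx:]:
--                 link_indexs[name] = (i, i + 1)
--             else:
--                 e = next_link_end[i + 1]
--                 if e is not None:
--                     link_indexs[name] = (i, e + 1)
--         if '<visual name="' in line:
--             e = next_visual_end[i + 1]
--             if e is not None:
--                 m = next_mesh[i + 1]
--                 mesh_name = extract(urdf_lines[m], 'mesh filename="')[0] if (m is not None and m <= e) else None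
--                 visual_indexs[mesh_name] = (i, e + 1)
--         if '<collision>' in line:
--             e = next_coll_end[i + 1]
--             if e is not None:
--                 m = next_mesh[i + 1]
--                 mesh_name = extract(urdf_lines[m], 'mesh filename="')[0] if (m is not None and m <= e) else None
--                 collision_indexs[mesh_name] = (i, e + 1)
--         if '<joint name="' in line:
--             name, right_idx = extract(line, '<joint name="')
--             if '/' in line[right_idx:]:
--                 joint_indexs[name] = (i, i + 1)
--             else:
--                 e = next_joint_end[i + 1]
--                 if e is not None:
--                     joint_indexs[name] = (i, e + 1)
--     return link_indexs, visual_indexs, collision_indexs, joint_indexs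
-- ===== Notes on version B (the rewrite author's own statement) =====
-- stated objective: alternative
-- what changed: Replaces A's per-opening forward rescans (a nested scan of the remaining lines for every link/visual/collision/joint opening) by five backward precomputation passes building next-occurrence arrays for the end markers and mesh lines, then one forward pass that looks each block's end and first mesh up in O(1); A's rescans are quadratic in the worst case, B is linear in the number of lines, but on marker-free input A does less work per line, so no speed is claimed.
import Mathlib
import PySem

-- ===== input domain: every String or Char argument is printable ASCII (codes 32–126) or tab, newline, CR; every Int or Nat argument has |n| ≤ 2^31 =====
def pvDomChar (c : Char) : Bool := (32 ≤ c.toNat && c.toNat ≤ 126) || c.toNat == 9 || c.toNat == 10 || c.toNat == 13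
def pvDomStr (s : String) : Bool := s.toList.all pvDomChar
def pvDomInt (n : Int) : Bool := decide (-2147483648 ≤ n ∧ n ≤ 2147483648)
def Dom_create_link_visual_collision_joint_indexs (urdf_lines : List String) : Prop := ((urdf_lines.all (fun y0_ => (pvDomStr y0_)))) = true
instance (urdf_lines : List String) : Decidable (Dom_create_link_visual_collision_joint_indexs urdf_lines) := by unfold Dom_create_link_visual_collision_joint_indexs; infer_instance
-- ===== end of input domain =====

-- B replaces A's per-opening forward rescans by backward next-occurrence precomputation plus one
-- forward pass (objective: alternative). Equivalence is about the return value only.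

-- ===== PORT A =====
-- name extraction on a line containing `pre`: left = line.find(pre)+len(pre); right = line.find('"', left)
def pvA_extract (line pre : String) : String × Int :=
  let left := PySem.Str.find line pre + (PySem.Str.len pre : Int)
  let right := PySem.Str.findFrom line "\"" left
  (PySem.Str.slice line (some left) (some right), right)

-- A's inner `for idx_l2, line2 in enumerate(...): if end in line2: ...; break` loop: index of the first line containing the marker
def pvA_findEnd (marker : String) : List String → Option Nat
  | [] => none
  | l :: ls => if PySem.Str.isIn marker l then some 0 else (pvA_findEnd marker ls).map (· + 1)

-- A's link/joint loop (the two loops are textually identical up to the markers)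
def pvA_named (urdf_lines : List String) (pre endm : String) : PySem.Dict String (Int × Int) :=
  (PySem.List.enumerate urdf_lines 0).foldl (fun d p =>
    if PySem.Str.isIn pre p.2 then
      let e := pvA_extract p.2 pre
      if PySem.Str.isIn "/" (PySem.Str.slice p.2 (some e.2) none) then
        d.insert e.1 (p.1, p.1 + 1)
      else
        match pvA_findEnd endm (PySem.List.slice urdf_lines (some (p.1 + 1)) none) with
        | some j => d.insert e.1 (p.1, p.1 + 1 + (j : Int) + 1)
        | none => d          -- Python: `assert end_idx is not None` fails (excluded by Pre_)
    else d) PySem.Dict.empty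

-- A's inner visual/collision scan: tracks the mesh name (the first mesh line; a second one is Python's
-- `assert mesh_name is None` failure, excluded by Pre_) and breaks at the end marker, returning its index
def pvA_scanVC (endm : String) : List String → Option String → Option (Option String × Nat)
  | [], _ => none
  | l :: ls, mesh =>
    let mesh' := if PySem.Str.isIn "mesh filename=\"" l then
        (if mesh = none then some (pvA_extract l "mesh filename=\"").1 else mesh)
      else mesh
    if PySem.Str.isIn endm l then some (mesh', 0)
    else (pvA_scanVC endm ls mesh').map (fun r => (r.1, r.2 + 1))

-- A's visual/collision loop (the two loops are textually identical up to the markers)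
def pvA_vc (urdf_lines : List String) (pre endm : String) : PySem.Dict (Option String) (Int × Int) :=
  (PySem.List.enumerate urdf_lines 0).foldl (fun d p =>
    if PySem.Str.isIn pre p.2 then
      match pvA_scanVC endm (PySem.List.slice urdf_lines (some (p.1 + 1)) none) none with
      | some r => d.insert r.1 (p.1, p.1 + 1 + (r.2 : Int) + 1)
      | none => d          -- Python: `assert end_idx is not None` fails (excluded by Pre_)
    else d) PySem.Dict.empty

def create_link_visual_collision_joint_indexs (urdf_lines : List String) : (List (String × Int × Int)) × (List (Option String × Int × Int)) × (List (Option String × Int × Int)) × (List (String × Int × Int)) :=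
  ((pvA_named urdf_lines "<link name=\"" "</link>").items,
   (pvA_vc urdf_lines "<visual name=\"" "</visual>").items,
   (pvA_vc urdf_lines "<collision>" "</collision>").items,
   (pvA_named urdf_lines "<joint name=\"" "</joint>").items)

-- ===== PORT B =====
-- Source B's next_occ, filled back to front: result has length (length lines)+1, entry i = the smallest
-- index j ≥ i whose line contains the marker (none if there is none; last entry = the padding res[n] = None)
def pvB_nextOcc (marker : String) : List String → Nat → List (Option Int)
  | [], _ => [none]
  | l :: ls, i =>
    let rest := pvB_nextOcc marker ls (i + 1)
    (if PySem.Str.isIn marker l then some (i : Int) else rest.headD none) :: rest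

def pvB_extract (line pre : String) : String × Int :=
  let left := PySem.Str.find line pre + (PySem.Str.len pre : Int)
  let right := PySem.Str.findFrom line "\"" left
  (PySem.Str.slice line (some left) (some right), right)

-- the link/joint body of Source B's single forward loop: end looked up in the precomputed array `nxt`
def pvB_namedStep (nxt : List (Option Int)) (pre : String) (d : PySem.Dict String (Int × Int)) (p : Int × String) : PySem.Dict String (Int × Int) :=
  if PySem.Str.isIn pre p.2 then
    let e := pvB_extract p.2 pre
    if PySem.Str.isIn "/" (PySem.Str.slice p.2 (some e.2) none) then d.insert e.1 (p.1, p.1 + 1)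
    else match PySem.List.pyGetD nxt (p.1 + 1) none with
      | some j => d.insert e.1 (p.1, j + 1)
      | none => d          -- Python: `assert` would fail in A (excluded by Pre_); Source B skips
  else d

-- the visual/collision body of Source B's loop: end and first mesh line looked up in `nxt` / `nm`
def pvB_vcStep (urdf_lines : List String) (nxt nm : List (Option Int)) (pre : String) (d : PySem.Dict (Option String) (Int × Int)) (p : Int × String) : PySem.Dict (Option String) (Int × Int) :=
  if PySem.Str.isIn pre p.2 then
    match PySem.List.pyGetD nxt (p.1 + 1) none with
    | some j =>
      d.insert (match PySem.List.pyGetD nm (p.1 + 1) none with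
        | some m => if m ≤ j then some (pvB_extract (PySem.List.pyGetD urdf_lines m "") "mesh filename=\"").1 else none
        | none => none) (p.1, j + 1)
    | none => d
  else d

def create_link_visual_collision_joint_indexs_alt (urdf_lines : List String) : (List (String × Int × Int)) × (List (Option String × Int × Int)) × (List (Option String × Int × Int)) × (List (String × Int × Int)) :=
  let nle := pvB_nextOcc "</link>" urdf_lines 0
  let nve := pvB_nextOcc "</visual>" urdf_lines 0
  let nce := pvB_nextOcc "</collision>" urdf_lines 0
  let nje := pvB_nextOcc "</joint>" urdf_lines 0
  let nm := pvB_nextOcc "mesh filename=\"" urdf_lines 0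
  let r := (PySem.List.enumerate urdf_lines 0).foldl (fun s p =>
      (pvB_namedStep nle "<link name=\"" s.1 p,
       pvB_vcStep urdf_lines nve nm "<visual name=\"" s.2.1 p,
       pvB_vcStep urdf_lines nce nm "<collision>" s.2.2.1 p,
       pvB_namedStep nje "<joint name=\"" s.2.2.2 p))
    (PySem.Dict.empty, PySem.Dict.empty, PySem.Dict.empty, PySem.Dict.empty)
  (r.1.items, r.2.1.items, r.2.2.1.items, r.2.2.2.items)

-- ===== PRECONDITION & SPEC =====
-- every non-self-closing `pre` opening line has an `endm` line strictly later
def pvNamedOk (urdf_lines : List String) (pre endm : String) : Bool :=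
  (List.range urdf_lines.length).all fun i =>
    !(PySem.Str.isIn pre (urdf_lines.getD i "") &&
      !(PySem.Str.isIn "/" (PySem.Str.slice (urdf_lines.getD i "") (some (pvA_extract (urdf_lines.getD i "") pre).2) none))) ||
    ((List.range urdf_lines.length).any fun j => decide (i < j) && PySem.Str.isIn endm (urdf_lines.getD j ""))

-- every `pre` opening line has an `endm` line strictly later, and the range from the next line up to and
-- including the FIRST such `endm` line contains at most one 'mesh filename="' line
def pvVcOk (urdf_lines : List String) (pre endm : String) : Bool :=
  (List.range urdf_lines.length).all fun i =>
    !(PySem.Str.isIn pre (urdf_lines.getD i "")) ||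
    (((List.range urdf_lines.length).any fun j => decide (i < j) && PySem.Str.isIn endm (urdf_lines.getD j "")) &&
     ((List.range urdf_lines.length).all fun j =>
        !(decide (i < j) && PySem.Str.isIn endm (urdf_lines.getD j "") &&
          ((List.range j).all fun k => !(decide (i < k) && PySem.Str.isIn endm (urdf_lines.getD k "")))) ||
        decide ((((urdf_lines.drop (i + 1)).take (j - i)).countP (fun l => PySem.Str.isIn "mesh filename=\"" l)) ≤ 1)))

-- Pre_ excludes exactly the inputs on which A raises AssertionError: a non-self-closing link/joint
-- opening, or a visual/collision opening, with no end marker on any later line; and a visual/collision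
-- block whose scanned range (from the line after the opening up to and including the first end-marker
-- line) contains more than one 'mesh filename="' line.
def Pre_create_link_visual_collision_joint_indexs (urdf_lines : List String) : Prop :=
  (pvNamedOk urdf_lines "<link name=\"" "</link>" &&
   pvNamedOk urdf_lines "<joint name=\"" "</joint>" &&
   pvVcOk urdf_lines "<visual name=\"" "</visual>" &&
   pvVcOk urdf_lines "<collision>" "</collision>") = true
instance (urdf_lines : List String) : Decidable (Pre_create_link_visual_collision_joint_indexs urdf_lines) := by unfold Pre_create_link_visual_collision_joint_indexs; infer_instance

def pvWitness_create_link_visual_collision_joint_indexs : List String :=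
  ["<link name=\"base\">", "<visual name=\"v\">", "mesh filename=\"m.obj\"/>", "</visual>",
   "<collision>", "mesh filename=\"m.obj\"/>", "</collision>", "</link>", "<joint name=\"j\"/>"]

def Spec_create_link_visual_collision_joint_indexs (urdf_lines : List String) (out : (List (String × Int × Int)) × (List (Option String × Int × Int)) × (List (Option String × Int × Int)) × (List (String × Int × Int))) : Prop := out = create_link_visual_collision_joint_indexs_alt urdf_lines
instance (urdf_lines : List String) (out : (List (String × Int × Int)) × (List (Option String × Int × Int)) × (List (Option String × Int × Int)) × (List (String × Int × Int))) : Decidable (Spec_create_link_visual_collision_joint_indexs urdf_lines out) := by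
  unfold Spec_create_link_visual_collision_joint_indexs
  exact @instDecidableEqProd _ _ inferInstance (@instDecidableEqProd _ _ inferInstance (@instDecidableEqProd _ _ inferInstance inferInstance)) _ _

-- ===== CLAIM (what is proved, stated in full; the proofs are below) =====
def Claim_equal_create_link_visual_collision_joint_indexs : Prop := ∀ (urdf_lines : List String), Dom_create_link_visual_collision_joint_indexs urdf_lines → Pre_create_link_visual_collision_joint_indexs urdf_lines → Spec_create_link_visual_collision_joint_indexs urdf_lines (create_link_visual_collision_joint_indexs urdf_lines)

-- ===== LEMMAS AND PROOFS =====

-- B's array lookup at position k is A's forward scan over the suffix from k (base index i)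
theorem pvNextOcc_getD (m : String) (ls : List String) (i k : Nat) (hk : k ≤ ls.length) :
    (pvB_nextOcc m ls i).getD k none = (pvA_findEnd m (ls.drop k)).map (fun j => ((i + k + j : Nat) : Int)) := by
  induction ls generalizing i k with
  | nil =>
    obtain rfl : k = 0 := by simpa using hk
    simp [pvB_nextOcc, pvA_findEnd]
  | cons l ls ih =>
    cases k with
    | zero =>
      rw [List.drop_zero]
      show (if PySem.Str.isIn m l then some (i : Int) else (pvB_nextOcc m ls (i+1)).headD none) = _
      by_cases h : PySem.Str.isIn m l
      · rw [if_pos h]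
        unfold pvA_findEnd
        rw [if_pos h]
        simp
      · rw [if_neg h]
        unfold pvA_findEnd
        rw [if_neg h]
        have hrest : (pvB_nextOcc m ls (i + 1)).headD none = (pvB_nextOcc m ls (i + 1)).getD 0 none := by
          cases pvB_nextOcc m ls (i + 1) <;> rfl
        rw [hrest, ih (i + 1) 0 (Nat.zero_le _), List.drop_zero]
        cases pvA_findEnd m ls <;> simp
        omega
    | succ k =>
      show (pvB_nextOcc m ls (i+1)).getD k none = _
      rw [ih (i + 1) k (by simpa using hk), List.drop_succ_cons]
      cases pvA_findEnd m (ls.drop k) <;> simp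
      omega

-- once the mesh name is set, A's inner scan only looks for the end marker
theorem pvScanVC_some (endm : String) (ls : List String) (v : String) :
    pvA_scanVC endm ls (some v) = (pvA_findEnd endm ls).map (fun j => (some v, j)) := by
  induction ls with
  | nil => rfl
  | cons l ls ih =>
    show (if PySem.Str.isIn endm l then some (_, 0)
          else (pvA_scanVC endm ls _).map (fun r => (r.1, r.2 + 1))) = _
    have hm : (if PySem.Str.isIn "mesh filename=\"" l then
        (if (some v : Option String) = none then some (pvA_extract l "mesh filename=\"").1 else some v)
      else some v) = some v := by split_ifs <;> simp_all
    rw [hm]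
    unfold pvA_findEnd
    by_cases h : PySem.Str.isIn endm l
    · rw [if_pos h, if_pos h]; rfl
    · rw [if_neg h, if_neg h, ih]
      cases pvA_findEnd endm ls <;> rfl

theorem pvScanVC_none (endm : String) (ls : List String) :
    pvA_scanVC endm ls none =
      match pvA_findEnd endm ls with
      | none => none
      | some j => some ((match pvA_findEnd "mesh filename=\"" ls with
          | some mj => if mj ≤ j then some (pvA_extract (ls.getD mj "") "mesh filename=\"").1 else none
          | none => none), j) := by
  induction ls with
  | nil => rfl
  | cons l ls ih =>
    show (if PySem.Str.isIn endm l then some (_, 0)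
          else (pvA_scanVC endm ls _).map (fun r => (r.1, r.2 + 1))) = _
    have hnil : (if (none : Option String) = none then some (pvA_extract l "mesh filename=\"").1 else none)
        = some (pvA_extract l "mesh filename=\"").1 := rfl
    rw [hnil]
    conv_rhs => rw [pvA_findEnd, pvA_findEnd]
    by_cases hM : PySem.Str.isIn "mesh filename=\"" l
    · rw [if_pos hM]
      by_cases hE : PySem.Str.isIn endm l
      · rw [if_pos hE, if_pos hE, if_pos hM]
        simp
      · rw [if_neg hE, if_neg hE, pvScanVC_some, if_pos hM]
        cases pvA_findEnd endm ls <;> simp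
    · rw [if_neg hM]
      by_cases hE : PySem.Str.isIn endm l
      · rw [if_pos hE, if_pos hE, if_neg hM]
        cases pvA_findEnd "mesh filename=\"" ls <;> simp
      · rw [if_neg hE, if_neg hE, ih, if_neg hM]
        cases pvA_findEnd endm ls with
        | none => simp
        | some j =>
          cases pvA_findEnd "mesh filename=\"" ls with
          | none => simp
          | some mj =>
            simp only [Option.map_some]
            by_cases hmj : mj ≤ j
            · rw [if_pos hmj, if_pos (by omega : mj + 1 ≤ j + 1)]
              simp
            · rw [if_neg hmj, if_neg (by omega : ¬ mj + 1 ≤ j + 1)]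

theorem pvExtract_eq : pvB_extract = pvA_extract := rfl

-- per-line equality of A's link/joint body and Source B's lookup body
theorem pvNamedStep_eq (urdf_lines : List String) (pre endm : String)
    (d : PySem.Dict String (Int × Int)) (p : Int × String) (hp : p ∈ PySem.List.enumerate urdf_lines 0) :
    (if PySem.Str.isIn pre p.2 then
      let e := pvA_extract p.2 pre
      if PySem.Str.isIn "/" (PySem.Str.slice p.2 (some e.2) none) then
        d.insert e.1 (p.1, p.1 + 1)
      else
        match pvA_findEnd endm (PySem.List.slice urdf_lines (some (p.1 + 1)) none) with
        | some j => d.insert e.1 (p.1, p.1 + 1 + (j : Int) + 1)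
        | none => d
    else d) = pvB_namedStep (pvB_nextOcc endm urdf_lines 0) pre d p := by
  rw [PySem.List.mem_enumerate_iff] at hp
  obtain ⟨k, hk, rfl⟩ := hp
  unfold pvB_namedStep
  rw [pvExtract_eq]
  by_cases h1 : PySem.Str.isIn pre urdf_lines[k]
  · rw [if_pos h1, if_pos h1]
    dsimp only
    by_cases h2 : PySem.Str.isIn "/" (PySem.Str.slice urdf_lines[k] (some (pvA_extract urdf_lines[k] pre).2) none)
    · rw [if_pos h2, if_pos h2]
    · rw [if_neg h2, if_neg h2]
      have hc : (0 : Int) + (k : Int) + 1 = ((k + 1 : Nat) : Int) := by push_cast; ring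
      rw [hc, PySem.List.slice_from urdf_lines (by exact_mod_cast Nat.zero_le (k+1)), PySem.List.pyGetD_natCast]
      rw [pvNextOcc_getD endm urdf_lines 0 (k + 1) (by omega)]
      simp only [Int.toNat_natCast]
      cases pvA_findEnd endm (urdf_lines.drop (k + 1)) with
      | none => rfl
      | some j =>
        simp only [Option.map_some]
        have hv : ((k + 1 : Nat) : Int) + (j : Int) + 1 = ((0 + (k + 1) + j : Nat) : Int) + 1 := by
          push_cast; ring
        rw [hv]
  · rw [if_neg h1, if_neg h1]

theorem pvGetD_drop {α : Type} (xs : List α) (a b : Nat) (d : α) :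
    (xs.drop a).getD b d = xs.getD (a + b) d := by
  simp [List.getD_eq_getElem?_getD, List.getElem?_drop]

-- per-line equality of A's visual/collision body and Source B's lookup body
theorem pvVcStep_eq (urdf_lines : List String) (pre endm : String)
    (d : PySem.Dict (Option String) (Int × Int)) (p : Int × String) (hp : p ∈ PySem.List.enumerate urdf_lines 0) :
    (if PySem.Str.isIn pre p.2 then
      match pvA_scanVC endm (PySem.List.slice urdf_lines (some (p.1 + 1)) none) none with
      | some r => d.insert r.1 (p.1, p.1 + 1 + (r.2 : Int) + 1)
      | none => d
    else d) = pvB_vcStep urdf_lines (pvB_nextOcc endm urdf_lines 0) (pvB_nextOcc "mesh filename=\"" urdf_lines 0) pre d p := by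
  rw [PySem.List.mem_enumerate_iff] at hp
  obtain ⟨k, hk, rfl⟩ := hp
  unfold pvB_vcStep
  rw [pvExtract_eq]
  by_cases h1 : PySem.Str.isIn pre urdf_lines[k]
  · rw [if_pos h1, if_pos h1]
    dsimp only
    have hc : (0 : Int) + (k : Int) + 1 = ((k + 1 : Nat) : Int) := by push_cast; ring
    rw [hc, PySem.List.slice_from urdf_lines (by exact_mod_cast Nat.zero_le (k+1)),
        PySem.List.pyGetD_natCast, PySem.List.pyGetD_natCast]
    rw [pvNextOcc_getD endm urdf_lines 0 (k + 1) (by omega),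
        pvNextOcc_getD "mesh filename=\"" urdf_lines 0 (k + 1) (by omega)]
    simp only [Int.toNat_natCast]
    rw [pvScanVC_none]
    cases pvA_findEnd endm (urdf_lines.drop (k + 1)) with
    | none => rfl
    | some j =>
      cases pvA_findEnd "mesh filename=\"" (urdf_lines.drop (k + 1)) with
      | none =>
        simp only [Option.map_some, Option.map_none]
        have hv : ((k + 1 : Nat) : Int) + (j : Int) + 1 = ((0 + (k + 1) + j : Nat) : Int) + 1 := by
          push_cast; ring
        rw [hv]
      | some mj =>
        simp only [Option.map_some]
        have hv : ((k + 1 : Nat) : Int) + (j : Int) + 1 = ((0 + (k + 1) + j : Nat) : Int) + 1 := by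
          push_cast; ring
        rw [hv]
        by_cases hmj : mj ≤ j
        · rw [if_pos hmj, if_pos (by exact_mod_cast by omega : ((0 + (k + 1) + mj : Nat) : Int) ≤ ((0 + (k + 1) + j : Nat) : Int))]
          rw [PySem.List.pyGetD_natCast]
          rw [show (0 + (k + 1) + mj : Nat) = (k + 1) + mj from by omega, ← pvGetD_drop]
        · rw [if_neg hmj, if_neg (by exact_mod_cast by omega : ¬ ((0 + (k + 1) + mj : Nat) : Int) ≤ ((0 + (k + 1) + j : Nat) : Int))]
  · rw [if_neg h1, if_neg h1]

-- a fold with a componentwise step is the tuple of the four component folds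
theorem pvFoldl_prod4 {α β γ δ ε : Type} (l : List α) (f1 : β → α → β) (f2 : γ → α → γ)
    (f3 : δ → α → δ) (f4 : ε → α → ε) (a : β) (b : γ) (c : δ) (d : ε) :
    l.foldl (fun s x => (f1 s.1 x, f2 s.2.1 x, f3 s.2.2.1 x, f4 s.2.2.2 x)) (a, b, c, d) =
      (l.foldl f1 a, l.foldl f2 b, l.foldl f3 c, l.foldl f4 d) := by
  induction l generalizing a b c d with
  | nil => rfl
  | cons x xs ih => simpa using ih (f1 a x) (f2 b x) (f3 c x) (f4 d x)

theorem pvPorts_eq (urdf_lines : List String) : create_link_visual_collision_joint_indexs urdf_lines = create_link_visual_collision_joint_indexs_alt urdf_lines := by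
  unfold create_link_visual_collision_joint_indexs create_link_visual_collision_joint_indexs_alt
  dsimp only
  rw [pvFoldl_prod4 (PySem.List.enumerate urdf_lines 0)
      (pvB_namedStep (pvB_nextOcc "</link>" urdf_lines 0) "<link name=\"")
      (pvB_vcStep urdf_lines (pvB_nextOcc "</visual>" urdf_lines 0) (pvB_nextOcc "mesh filename=\"" urdf_lines 0) "<visual name=\"")
      (pvB_vcStep urdf_lines (pvB_nextOcc "</collision>" urdf_lines 0) (pvB_nextOcc "mesh filename=\"" urdf_lines 0) "<collision>")
      (pvB_namedStep (pvB_nextOcc "</joint>" urdf_lines 0) "<joint name=\"")]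
  unfold pvA_named pvA_vc
  rw [PySem.List.foldl_congr_mem _ _ _ _ (fun d p hp => pvNamedStep_eq urdf_lines "<link name=\"" "</link>" d p hp),
      PySem.List.foldl_congr_mem _ _ _ _ (fun d p hp => pvVcStep_eq urdf_lines "<visual name=\"" "</visual>" d p hp),
      PySem.List.foldl_congr_mem _ _ _ _ (fun d p hp => pvVcStep_eq urdf_lines "<collision>" "</collision>" d p hp),
      PySem.List.foldl_congr_mem _ _ _ _ (fun d p hp => pvNamedStep_eq urdf_lines "<joint name=\"" "</joint>" d p hp)]

-- ===== VERDICT (by name: the statement is the Claim_ definition above) =====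
theorem create_link_visual_collision_joint_indexs_spec : Claim_equal_create_link_visual_collision_joint_indexs := by
  intro urdf_lines _ _
  unfold Spec_create_link_visual_collision_joint_indexs
  exact pvPorts_eq urdf_lines
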